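-- pv_equiv track=rewrite | github.com/JohnDorsey/GeodeFractals | photo.py | shared_items_are_consecutive
-- ===== SOURCE A (Python) =====
-- def shared_items_are_consecutive(input_list, input_set, require_immediate_start=False):
--     inputItemGen = iter(input_list)
--     for item in inputItemGen:
--         if item not in input_set:
--             if require_immediate_start:
--                 return False
--         else:
--             break
--     for item in inputItemGen:
--         # it doesn't matter how long the run of matches lasts.
--         # zero matches in this loop means a match run length of one, where the one match was encountered in the first loop.
--         if item not in input_set:
--             break
--     for item in inputItemGen: # make sure there are no _more_ matches.
--         if item in input_set:
--             return False
--     return True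
-- ===== SOURCE B (Python) =====
-- def shared_items_are_consecutive(input_list, input_set, require_immediate_start=False):
--     positions = [i for i, item in enumerate(input_list) if item in input_set]
--     if not positions:
--         return not (require_immediate_start and len(input_list) > 0)
--     if positions[-1] - positions[0] + 1 != len(positions):
--         return False
--     if require_immediate_start and positions[0] != 0:
--         return False
--     return True
-- ===== Notes on version B (the rewrite author's own statement) =====
-- stated objective: alternative
-- what changed: Replaces A's three sequential iterator-consuming loops (skip non-members, skip the run, reject further members) with a single enumerate pass that collects the member indices and an arithmetic contiguity check last-first+1 == count.
import Mathlib
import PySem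

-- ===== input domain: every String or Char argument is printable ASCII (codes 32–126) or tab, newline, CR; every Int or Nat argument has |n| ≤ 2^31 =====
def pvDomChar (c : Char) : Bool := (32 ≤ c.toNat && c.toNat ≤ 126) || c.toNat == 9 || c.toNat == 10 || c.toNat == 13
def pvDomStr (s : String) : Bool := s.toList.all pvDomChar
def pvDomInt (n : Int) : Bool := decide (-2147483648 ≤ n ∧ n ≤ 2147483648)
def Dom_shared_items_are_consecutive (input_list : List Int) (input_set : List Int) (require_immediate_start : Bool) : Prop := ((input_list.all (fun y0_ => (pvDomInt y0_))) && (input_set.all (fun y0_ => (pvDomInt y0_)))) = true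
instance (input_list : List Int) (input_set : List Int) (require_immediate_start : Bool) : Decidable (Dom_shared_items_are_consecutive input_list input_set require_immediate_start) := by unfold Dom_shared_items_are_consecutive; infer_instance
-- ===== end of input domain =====

-- ===== PORT A =====
-- B changes: one index-collecting pass + arithmetic contiguity check instead of A's three
-- sequential loops over a shared iterator (objective: alternative).
-- first loop of A: skip leading non-members (False under require_immediate_start); none = early `return False`
def pvLoop1 (input_set : List Int) (require_immediate_start : Bool) : List Int → Option (List Int)
  | [] => some []
  | x :: rest =>
    if x ∈ input_set then some rest
    else if require_immediate_start then none
    else pvLoop1 input_set require_immediate_start rest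

-- second loop of A: skip the run of members, return the iterator's remainder
def pvLoop2 (input_set : List Int) : List Int → List Int
  | [] => []
  | x :: rest => if x ∈ input_set then pvLoop2 input_set rest else rest

-- third loop of A: no further member may appear
def pvLoop3 (input_set : List Int) : List Int → Bool
  | [] => true
  | x :: rest => if x ∈ input_set then false else pvLoop3 input_set rest

def shared_items_are_consecutive (input_list : List Int) (input_set : List Int) (require_immediate_start : Bool) : Bool :=
  match pvLoop1 input_set require_immediate_start input_list with
  | none => false
  | some rest => pvLoop3 input_set (pvLoop2 input_set rest)

-- ===== PORT B =====
-- the enumerate-pass of Source B: indices (starting at i) of the members of input_list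
def pvPositions (input_list : List Int) (input_set : List Int) (i : Int) : List Int :=
  match input_list with
  | [] => []
  | x :: rest =>
    if x ∈ input_set then i :: pvPositions rest input_set (i + 1)
    else pvPositions rest input_set (i + 1)

def shared_items_are_consecutive_alt (input_list : List Int) (input_set : List Int) (require_immediate_start : Bool) : Bool :=
  match pvPositions input_list input_set 0 with
  | [] => !(require_immediate_start && !input_list.isEmpty)
  | p :: ps =>
    if (p :: ps).getLastD 0 - p + 1 ≠ ((p :: ps).length : Int) then false
    else if require_immediate_start && (p != 0) then false
    else true

-- ===== PRECONDITION & SPEC =====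
def Spec_shared_items_are_consecutive (input_list : List Int) (input_set : List Int) (require_immediate_start : Bool) (out : Bool) : Prop := out = shared_items_are_consecutive_alt input_list input_set require_immediate_start
instance (input_list : List Int) (input_set : List Int) (require_immediate_start : Bool) (out : Bool) : Decidable (Spec_shared_items_are_consecutive input_list input_set require_immediate_start out) := by unfold Spec_shared_items_are_consecutive; infer_instance

-- ===== CLAIM (what is proved, stated in full; the proofs are below) =====
def Claim_equal_shared_items_are_consecutive : Prop := ∀ (input_list : List Int) (input_set : List Int) (require_immediate_start : Bool), Dom_shared_items_are_consecutive input_list input_set require_immediate_start → Spec_shared_items_are_consecutive input_list input_set require_immediate_start (shared_items_are_consecutive input_list input_set require_immediate_start)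

-- ===== LEMMAS AND PROOFS =====

theorem pvPositions_shift (input_set : List Int) : ∀ (l : List Int) (i : Int),
    pvPositions l input_set (i + 1) = (pvPositions l input_set i).map (· + 1) := by
  intro l
  induction l with
  | nil => intro i; simp [pvPositions]
  | cons x rest ih =>
    intro i
    by_cases hx : x ∈ input_set <;> simp [pvPositions, hx, ih (i + 1)]

theorem pvPositions_nonneg (input_set : List Int) : ∀ (l : List Int) (i x : Int),
    x ∈ pvPositions l input_set i → i ≤ x := by
  intro l
  induction l with
  | nil => intro i x h; simp [pvPositions] at h
  | cons y rest ih =>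
    intro i x h
    by_cases hy : y ∈ input_set <;> simp [pvPositions, hy] at h
    · rcases h with h | h
      · omega
      · have := ih (i + 1) x h; omega
    · have := ih (i + 1) x h; omega

theorem pvLoop3_eq (input_set : List Int) : ∀ (l : List Int) (i : Int),
    pvLoop3 input_set l = decide (pvPositions l input_set i = []) := by
  intro l
  induction l with
  | nil => intro i; simp [pvLoop3, pvPositions]
  | cons x rest ih =>
    intro i
    by_cases hx : x ∈ input_set <;> simp [pvLoop3, pvPositions, hx, ih (i + 1)]

theorem pvLastD_cons_cons (a b : Int) (t : List Int) :
    (a :: b :: t).getLastD 0 = (b :: t).getLastD 0 := by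
  simp [List.getLastD_eq_getLast?, List.getLast?_cons_cons]

theorem pvGetLastD_map_add0 (l : List Int) (h : l ≠ []) :
    (l.map (· + 1)).getLastD 0 = l.getLastD 0 + 1 := by
  obtain ⟨v, hv⟩ := Option.isSome_iff_exists.mp (List.getLast?_isSome.mpr h)
  have hm : (l.map (· + 1)).getLast? = some (v + 1) := by
    rw [List.getLast?_map, hv]; rfl
  simp [List.getLastD_eq_getLast?, hv, hm]

theorem pvPositions_lb (input_set : List Int) : ∀ (l : List Int) (i : Int),
    pvPositions l input_set i = [] ∨
      i + ((pvPositions l input_set i).length : Int) ≤ (pvPositions l input_set i).getLastD 0 + 1 := by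
  intro l
  induction l with
  | nil => intro i; exact Or.inl rfl
  | cons x rest ih =>
    intro i
    by_cases hx : x ∈ input_set
    · right
      rw [show pvPositions (x :: rest) input_set i = i :: pvPositions rest input_set (i + 1) from by
        simp [pvPositions, hx]]
      rcases ih (i + 1) with h | h
      · rw [h]
        simp [List.getLastD_eq_getLast?]
      · cases hp : pvPositions rest input_set (i + 1) with
        | nil => simp [List.getLastD_eq_getLast?]
        | cons p ps =>
          rw [hp] at h
          rw [pvLastD_cons_cons i p ps]
          simp only [List.length_cons] at h ⊢
          push_cast at h ⊢
          omega
    · rw [show pvPositions (x :: rest) input_set i = pvPositions rest input_set (i + 1) from by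
        simp [pvPositions, hx]]
      rcases ih (i + 1) with h | h
      · exact Or.inl h
      · right; omega

theorem pvA2 (input_set : List Int) : ∀ (rest : List Int),
    pvLoop3 input_set (pvLoop2 input_set rest) =
      decide (((pvPositions rest input_set 0).map (· + 1)).getLastD 0 + 1
        = ((pvPositions rest input_set 0).length : Int) + 1) := by
  intro rest
  induction rest with
  | nil => simp [pvLoop2, pvLoop3, pvPositions]
  | cons y r ih =>
    by_cases hy : y ∈ input_set
    · -- loop2 skips y; positions gain a leading 0
      have hpos : pvPositions (y :: r) input_set 0 = 0 :: (pvPositions r input_set 0).map (· + 1) := by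
        simp [pvPositions, hy, ← pvPositions_shift input_set r 0]
      rw [show pvLoop3 input_set (pvLoop2 input_set (y :: r)) = pvLoop3 input_set (pvLoop2 input_set r) by
        simp [pvLoop2, hy], ih, hpos]
      cases hp : pvPositions r input_set 0 with
      | nil => simp
      | cons p ps =>
        have hq : (p :: ps).map (· + 1) ≠ [] := by simp
        have e1 : ((p :: ps).map (· + 1)).getLastD 0 = (p :: ps).getLastD 0 + 1 :=
          pvGetLastD_map_add0 _ (by simp)
        have e2 : (((p :: ps).map (· + 1)).map (· + 1)).getLastD 0
            = ((p :: ps).map (· + 1)).getLastD 0 + 1 := pvGetLastD_map_add0 _ hq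
        have e3 : ((0 :: (p :: ps).map (· + 1)).map (· + 1)).getLastD 0
            = (((p :: ps).map (· + 1)).map (· + 1)).getLastD 0 := by
          simp only [List.map_cons]
          exact pvLastD_cons_cons 1 _ _
        rw [e3, e2, e1]
        simp only [decide_eq_decide, List.length_cons, List.length_map]
        push_cast
        omega
    · -- loop2 breaks immediately; remainder is r
      have hl : pvLoop3 input_set (pvLoop2 input_set (y :: r)) = pvLoop3 input_set r := by
        simp [pvLoop2, hy]
      have hpos : pvPositions (y :: r) input_set 0 = (pvPositions r input_set 0).map (· + 1) := by
        simp [pvPositions, hy, ← pvPositions_shift input_set r 0]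
      rw [hl, hpos]
      cases hp : pvPositions r input_set 0 with
      | nil => simp [pvLoop3_eq input_set r 0, hp]
      | cons p ps =>
        have hfalse : pvLoop3 input_set r = false := by
          simp [pvLoop3_eq input_set r 0, hp]
        have e1 : ((p :: ps).map (· + 1)).getLastD 0 = (p :: ps).getLastD 0 + 1 :=
          pvGetLastD_map_add0 _ (by simp)
        have e2 : (((p :: ps).map (· + 1)).map (· + 1)).getLastD 0
            = ((p :: ps).map (· + 1)).getLastD 0 + 1 := pvGetLastD_map_add0 _ (by simp)
        have lb := pvPositions_lb input_set r 0
        rw [hp] at lb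
        rcases lb with h | h
        · exact absurd h (by simp)
        · rw [hfalse, e2, e1]
          simp only [List.length_map, List.length_cons] at h ⊢
          rw [eq_comm, decide_eq_false_iff_not]
          push_cast at h ⊢
          omega

theorem pv_main (input_list input_set : List Int) (req : Bool) :
    shared_items_are_consecutive input_list input_set req
      = shared_items_are_consecutive_alt input_list input_set req := by
  induction input_list with
  | nil =>
    simp [shared_items_are_consecutive, shared_items_are_consecutive_alt, pvLoop1, pvLoop2,
      pvLoop3, pvPositions]
  | cons x rest ih =>
    by_cases hx : x ∈ input_set
    · -- first member found at index 0
      have hpos : pvPositions (x :: rest) input_set 0 = 0 :: (pvPositions rest input_set 0).map (· + 1) := by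
        simp [pvPositions, hx, ← pvPositions_shift input_set rest 0]
      have hA : shared_items_are_consecutive (x :: rest) input_set req
          = pvLoop3 input_set (pvLoop2 input_set rest) := by
        simp [shared_items_are_consecutive, pvLoop1, hx]
      rw [hA, pvA2 input_set rest]
      simp only [shared_items_are_consecutive_alt, hpos]
      have h0 : ((0 : Int) :: (pvPositions rest input_set 0).map (· + 1)).getLastD 0
          = ((pvPositions rest input_set 0).map (· + 1)).getLastD 0 := by
        cases hp : pvPositions rest input_set 0 with
        | nil => simp
        | cons p ps => exact pvLastD_cons_cons 0 _ _
      rw [h0]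
      simp only [List.length_cons, List.length_map, bne_self_eq_false, Bool.and_false,
        Bool.false_eq_true, if_false]
      split
      · next h => rw [decide_eq_false_iff_not.mpr]; push_cast at h ⊢; omega
      · next h => rw [decide_eq_true_eq.mpr]; push_cast at h ⊢; omega
    · -- first element is not a member
      have hpos : pvPositions (x :: rest) input_set 0 = (pvPositions rest input_set 0).map (· + 1) := by
        simp [pvPositions, hx, ← pvPositions_shift input_set rest 0]
      cases req with
      | true =>
        have hA : shared_items_are_consecutive (x :: rest) input_set true = false := by
          simp [shared_items_are_consecutive, pvLoop1, hx]
        rw [hA]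
        simp only [shared_items_are_consecutive_alt, hpos]
        cases hp : pvPositions rest input_set 0 with
        | nil => simp
        | cons p ps =>
          have hge : (0 : Int) ≤ p := pvPositions_nonneg input_set rest 0 p (by simp [hp])
          simp only [List.map_cons]
          split
          · rfl
          · have : (p + 1) ≠ (0 : Int) := by omega
            simp [this]
      | false =>
        have hA : shared_items_are_consecutive (x :: rest) input_set false
            = shared_items_are_consecutive rest input_set false := by
          simp [shared_items_are_consecutive, pvLoop1, hx]
        rw [hA, ih]
        simp only [shared_items_are_consecutive_alt, hpos]
        cases hp : pvPositions rest input_set 0 with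
        | nil => simp
        | cons p ps =>
          have e1 : ((p :: ps).map (· + 1)).getLastD 0 = (p :: ps).getLastD 0 + 1 :=
            pvGetLastD_map_add0 _ (by simp)
          simp only [List.map_cons] at e1 ⊢
          rw [e1]
          simp only [Bool.false_and, Bool.false_eq_true, if_false, List.length_cons, List.length_map]
          split
          · next h =>
            rw [if_pos]
            push_cast at h ⊢; omega
          · next h =>
            rw [if_neg]
            push_cast at h ⊢; omega


-- ===== VERDICT (by name: the statement is the Claim_ definition above) =====
theorem shared_items_are_consecutive_spec : Claim_equal_shared_items_are_consecutive := by
  intro input_list input_set req _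
  unfold Spec_shared_items_are_consecutive
  exact pv_main input_list input_set req
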